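-- pv_equiv track=rewrite | github.com/mausv/Hours | Backend/api.py | _calculate_time_in_minutes
-- ===== SOURCE A (Python) =====
-- def _calculate_time_in_minutes(minutes):
--     time = 0
--     billable_time = 0
--     time_windows = []
--     for starting, ending, billable in minutes:
--         c_time = ending - starting
--         if billable:
--             billable_time += c_time
--         else:
--             time += c_time
--         time_windows.append(c_time)
--     return billable_time, time, time_windows
-- ===== SOURCE B (Python) =====
-- def _calculate_time_in_minutes(minutes):
--     # Divide and conquer: halve the list, solve each half, merge the triples.
--     n = len(minutes)
--     if n == 0:
--         return 0, 0, []
--     if n == 1: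
--         starting, ending, billable = minutes[0]
--         w = ending - starting
--         return (w, 0, [w]) if billable else (0, w, [w])
--     mid = n // 2
--     bl, tl, wl = _calculate_time_in_minutes(minutes[:mid])
--     br, tr, wr = _calculate_time_in_minutes(minutes[mid:])
--     return bl + br, tl + tr, wl + wr
-- ===== Notes on version B (the rewrite author's own statement) =====
-- stated objective: alternative
-- what changed: Replaced the single accumulator loop with a divide-and-conquer recursion that splits the list in halves, solves each half independently and merges the (billable, time, windows) triples; correct because all three outputs are concatenation/sum homomorphisms.
import Mathlib
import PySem

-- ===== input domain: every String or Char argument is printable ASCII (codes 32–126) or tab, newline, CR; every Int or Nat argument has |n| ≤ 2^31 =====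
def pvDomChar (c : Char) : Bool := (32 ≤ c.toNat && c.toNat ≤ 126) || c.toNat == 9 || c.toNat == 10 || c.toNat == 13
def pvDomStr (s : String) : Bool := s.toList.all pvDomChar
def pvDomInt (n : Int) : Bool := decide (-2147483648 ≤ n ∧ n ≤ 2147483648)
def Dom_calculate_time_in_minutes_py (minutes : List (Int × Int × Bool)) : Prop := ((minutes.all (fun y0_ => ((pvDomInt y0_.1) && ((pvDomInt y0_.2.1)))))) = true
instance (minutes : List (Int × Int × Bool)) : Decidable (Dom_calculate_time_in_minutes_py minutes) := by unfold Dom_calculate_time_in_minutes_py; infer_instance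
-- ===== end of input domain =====

-- B replaces A's single accumulator loop with a divide-and-conquer recursion (split in halves, merge triples); an alternative decomposition, same results.


-- ===== PORT A =====
-- single fused loop over the triples, accumulating (billable_time, time, windows)
def calcA_loop (minutes : List (Int × Int × Bool)) (time billable_time : Int) (time_windows : List Int) : Int × Int × List Int :=
  match minutes with
  | [] => (billable_time, time, time_windows)
  | (starting, ending, billable) :: rest =>
    let c_time := ending - starting
    if billable then
      calcA_loop rest time (billable_time + c_time) (time_windows ++ [c_time])
    else
      calcA_loop rest (time + c_time) billable_time (time_windows ++ [c_time])

def calculate_time_in_minutes_py (minutes : List (Int × Int × Bool)) : Int × Int × List Int :=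
  calcA_loop minutes 0 0 []

-- ===== PORT B =====
-- divide and conquer, mirroring Source B; minutes[:mid] / minutes[mid:] with 0 ≤ mid ≤ n are
-- exactly List.take mid / List.drop mid
def calculate_time_in_minutes_py_alt (minutes : List (Int × Int × Bool)) : Int × Int × List Int :=
  match minutes with
  | [] => (0, 0, [])
  | [(starting, ending, billable)] =>
      let w := ending - starting
      if billable then (w, 0, [w]) else (0, w, [w])
  | x :: y :: rest =>
      let mid := (x :: y :: rest).length / 2
      let left := calculate_time_in_minutes_py_alt ((x :: y :: rest).take mid)
      let right := calculate_time_in_minutes_py_alt ((x :: y :: rest).drop mid)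
      (left.1 + right.1, left.2.1 + right.2.1, left.2.2 ++ right.2.2)
termination_by minutes.length
decreasing_by
  · simp [List.length_take]; omega
  · simp; omega

-- ===== PRECONDITION & SPEC =====
def Spec_calculate_time_in_minutes_py (minutes : List (Int × Int × Bool)) (out : Int × Int × List Int) : Prop := out = calculate_time_in_minutes_py_alt minutes
instance (minutes : List (Int × Int × Bool)) (out : Int × Int × List Int) : Decidable (Spec_calculate_time_in_minutes_py minutes out) := by unfold Spec_calculate_time_in_minutes_py; infer_instance

-- ===== CLAIM (what is proved, stated in full; the proofs are below) =====
def Claim_equal_calculate_time_in_minutes_py : Prop := ∀ (minutes : List (Int × Int × Bool)), Dom_calculate_time_in_minutes_py minutes → Spec_calculate_time_in_minutes_py minutes (calculate_time_in_minutes_py minutes)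

-- ===== LEMMAS AND PROOFS =====

-- the common characterisation both ports are proved equal to
def calcCanon (l : List (Int × Int × Bool)) : Int × Int × List Int :=
  (((l.filter (fun p => p.2.2)).map (fun p => p.2.1 - p.1)).sum,
   ((l.filter (fun p => !p.2.2)).map (fun p => p.2.1 - p.1)).sum,
   l.map (fun p => p.2.1 - p.1))

-- A's loop invariant
theorem calcA_loop_eq (minutes : List (Int × Int × Bool)) (t bt : Int) (tw : List Int) :
    calcA_loop minutes t bt tw =
      (bt + (calcCanon minutes).1, t + (calcCanon minutes).2.1, tw ++ (calcCanon minutes).2.2) := by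
  induction minutes generalizing t bt tw with
  | nil => simp [calcA_loop, calcCanon]
  | cons hd tl ih =>
    obtain ⟨s, e, b⟩ := hd
    cases b <;> simp [calcA_loop, ih, calcCanon, List.filter] <;> ring_nf

-- calcCanon is a homomorphism for append
theorem calcCanon_append (l₁ l₂ : List (Int × Int × Bool)) :
    calcCanon (l₁ ++ l₂) =
      ((calcCanon l₁).1 + (calcCanon l₂).1,
       (calcCanon l₁).2.1 + (calcCanon l₂).2.1,
       (calcCanon l₁).2.2 ++ (calcCanon l₂).2.2) := by
  simp [calcCanon, List.filter_append, List.map_append]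

-- B's divide-and-conquer computes calcCanon
theorem calcB_eq (minutes : List (Int × Int × Bool)) :
    calculate_time_in_minutes_py_alt minutes = calcCanon minutes := by
  induction minutes using calculate_time_in_minutes_py_alt.induct with
  | case1 => simp [calculate_time_in_minutes_py_alt, calcCanon]
  | case2 s e => simp [calculate_time_in_minutes_py_alt, calcCanon]
  | case3 s e b h => simp [calculate_time_in_minutes_py_alt, calcCanon, h]
  | case4 x y rest mid ihl ihr =>
    rw [calculate_time_in_minutes_py_alt,
        show ((x :: y :: rest).length / 2) = mid from rfl, ihl, ihr]
    conv_rhs => rw [← List.take_append_drop mid (x :: y :: rest)]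
    rw [calcCanon_append]

-- ===== VERDICT (by name: the statement is the Claim_ definition above) =====
theorem calculate_time_in_minutes_py_spec : Claim_equal_calculate_time_in_minutes_py := by
  intro minutes _
  unfold Spec_calculate_time_in_minutes_py calculate_time_in_minutes_py
  rw [calcA_loop_eq, calcB_eq]
  simp
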